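-- pv_equiv track=rewrite | github.com/the-deep/deep-experiments | scripts/training/selim/multiclass-lightning/MultitaskTwoSteps/utils.py | get_tag_id_to_layer_id
-- ===== SOURCE A (Python) =====
-- def get_tag_id_to_layer_id(ids_each_level):
--     tag_id = 0
--     list_id = 0
--     tag_to_list = {}
--     for id_list in ids_each_level:
--         for i in range(len(id_list)):
--             tag_to_list.update({tag_id + i: list_id})
--         tag_id += len(id_list)
--         list_id += 1
--     return tag_to_list
-- ===== SOURCE B (Python) =====
-- def get_tag_id_to_layer_id(ids_each_level):
--     # Prefix sums of the sublist lengths give the (cumulative) upper bound of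
--     # each layer's tag-id block; each tag id is then mapped to its layer by a
--     # binary search for the first bound strictly greater than the tag id.
--     bounds = []
--     total = 0
--     for id_list in ids_each_level:
--         total += len(id_list)
--         bounds.append(total)
--     result = {}
--     for t in range(total):
--         lo = 0
--         hi = len(bounds) - 1
--         while lo < hi:
--             mid = (lo + hi) // 2
--             if t < bounds[mid]:
--                 hi = mid
--             else:
--                 lo = mid + 1
--         result[t] = lo
--     return result
-- ===== Notes on version B (the rewrite author's own statement) =====
-- stated objective: alternative
-- what changed: Replaces A's sequential counter enumeration with prefix sums of the sublist lengths followed by a per-tag binary search for the first cumulative bound exceeding the tag id.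
import Mathlib
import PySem

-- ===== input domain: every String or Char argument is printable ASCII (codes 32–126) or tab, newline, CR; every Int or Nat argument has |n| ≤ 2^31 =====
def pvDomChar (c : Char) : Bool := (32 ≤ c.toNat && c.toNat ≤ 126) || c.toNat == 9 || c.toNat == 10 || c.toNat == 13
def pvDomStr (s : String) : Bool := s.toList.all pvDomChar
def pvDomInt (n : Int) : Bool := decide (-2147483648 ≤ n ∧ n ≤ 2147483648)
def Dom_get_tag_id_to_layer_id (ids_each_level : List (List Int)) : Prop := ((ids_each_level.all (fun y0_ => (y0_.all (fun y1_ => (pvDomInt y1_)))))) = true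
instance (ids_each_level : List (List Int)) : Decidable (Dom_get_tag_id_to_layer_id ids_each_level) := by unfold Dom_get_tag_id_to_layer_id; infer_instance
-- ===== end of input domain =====

-- B replaces A's sequential counter enumeration with prefix sums of the sublist lengths plus a
-- binary search mapping each tag id to the first cumulative bound exceeding it (objective:
-- alternative algorithm, not claimed faster).

-- ===== PORT A =====
def get_tag_id_to_layer_id (ids_each_level : List (List Int)) : List (Int × Int) :=
  let st := ids_each_level.foldl
    (fun (st : Int × Int × PySem.Dict Int Int) id_list =>
      let d := (PySem.List.pyRange 0 id_list.length 1).foldl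
        (fun d i => d.insert (st.1 + i) st.2.1) st.2.2
      (st.1 + id_list.length, st.2.1 + 1, d))
    (0, 0, PySem.Dict.empty)
  st.2.2.items

-- ===== PORT B =====
-- the while loop 'while lo < hi: mid = (lo+hi)//2; …' of Source B; bounds[mid] is ported with
-- pyGetD default 0, exact here because B only calls it with 0 ≤ lo ≤ mid < hi ≤ len(bounds)-1
def locateGo (bounds : List Int) (t : Int) (lo hi : Int) : Int :=
  if h : lo < hi then
    if t < PySem.List.pyGetD bounds (PySem.Int.floordiv (lo + hi) 2) 0 then
      locateGo bounds t lo (PySem.Int.floordiv (lo + hi) 2)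
    else
      locateGo bounds t (PySem.Int.floordiv (lo + hi) 2 + 1) hi
  else lo
termination_by (hi - lo).toNat
decreasing_by
  · have h3 : PySem.Int.floordiv (lo + hi) 2 < hi := by
      rw [PySem.Int.floordiv_lt_iff_lt_mul (by norm_num)]
      omega
    omega
  · have h2 := PySem.Int.floordiv_two_mid_bounds (le_of_lt h)
    omega

def get_tag_id_to_layer_id_alt (ids_each_level : List (List Int)) : List (Int × Int) :=
  let bt := ids_each_level.foldl
    (fun (st : List Int × Int) id_list =>
      (st.1 ++ [st.2 + id_list.length], st.2 + id_list.length)) ([], 0)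
  let bounds := bt.1
  let total := bt.2
  let result := (PySem.List.pyRange 0 total 1).foldl
    (fun (d : PySem.Dict Int Int) t =>
      d.insert t (locateGo bounds t 0 (bounds.length - 1))) PySem.Dict.empty
  result.items

-- ===== PRECONDITION & SPEC =====
def Spec_get_tag_id_to_layer_id (ids_each_level : List (List Int)) (out : List (Int × Int)) : Prop := out = get_tag_id_to_layer_id_alt ids_each_level
instance (ids_each_level : List (List Int)) (out : List (Int × Int)) : Decidable (Spec_get_tag_id_to_layer_id ids_each_level out) := by unfold Spec_get_tag_id_to_layer_id; infer_instance

-- ===== CLAIM =====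
def Claim_equal_get_tag_id_to_layer_id : Prop := ∀ (ids_each_level : List (List Int)), Dom_get_tag_id_to_layer_id ids_each_level → Spec_get_tag_id_to_layer_id ids_each_level (get_tag_id_to_layer_id ids_each_level)

-- ===== LEMMAS AND PROOFS =====

-- the flat list of layer indices, one entry per tag, starting at layer li
def layersOf (ls : List (List Int)) (li : Int) : List Int :=
  match ls with
  | [] => []
  | l :: t => List.replicate l.length li ++ layersOf t (li + 1)

-- cumulative sums of the sublist lengths (B's 'bounds'), and the grand total
def prefixOf (ls : List (List Int)) : List Int :=
  match ls with
  | [] => []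
  | l :: r => (l.length : Int) :: (prefixOf r).map (· + (l.length : Int))

def totalOf (ls : List (List Int)) : Int :=
  match ls with
  | [] => 0
  | l :: r => (l.length : Int) + totalOf r

theorem enumerate_replicate (n : Nat) (x : Int) (s : Int) :
    PySem.List.enumerate (List.replicate n x) s
      = (PySem.List.pyRange s (s + n) 1).map (fun k => (k, x)) := by
  induction n generalizing s with
  | zero => simp [PySem.List.pyRange_one_eq_nil]
  | succ n ih =>
      rw [List.replicate_succ, PySem.List.enumerate_cons, ih (s + 1)]
      have h1 : s + ((n + 1 : Nat) : Int) = (s + 1) + (n : Int) := by push_cast; ring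
      rw [h1, show PySem.List.pyRange s ((s + 1) + (n : Int)) 1
          = s :: PySem.List.pyRange (s + 1) ((s + 1) + (n : Int)) 1
        from PySem.List.pyRange_one_cons (by omega)]
      simp

-- ---- A's loop invariant: with L entries already inserted, the result enumerates L ++ layersOf ls li
theorem A_loop (ls : List (List Int)) (li : Int) (L : List Int) (d : PySem.Dict Int Int)
    (hd : d.items = PySem.List.enumerate L 0) :
    (ls.foldl
      (fun (st : Int × Int × PySem.Dict Int Int) id_list =>
        let d := (PySem.List.pyRange 0 id_list.length 1).foldl
          (fun d i => d.insert (st.1 + i) st.2.1) st.2.2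
        (st.1 + id_list.length, st.2.1 + 1, d))
      ((L.length : Int), li, d)).2.2.items
      = PySem.List.enumerate (L ++ layersOf ls li) 0 := by
  induction ls generalizing li L d with
  | nil => simpa [layersOf] using hd
  | cons l t ih =>
      simp only [List.foldl_cons]
      have hkeys : d.keys = PySem.List.pyRange 0 (L.length : Int) 1 := by
        show d.items.map Prod.fst = _
        rw [hd]
        simpa using PySem.List.map_fst_enumerate L 0
      have hfresh : ∀ i ∈ PySem.List.pyRange 0 (l.length : Int) 1,
          d.contains ((L.length : Int) + i) = false := by
        intro i hi
        rw [PySem.List.mem_pyRange_one] at hi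
        rw [PySem.Dict.contains_eq_decide_mem_keys, hkeys]
        simp [PySem.List.mem_pyRange_one]; omega
      have hnd : ((PySem.List.pyRange 0 (l.length : Int) 1).map
          (fun i => (L.length : Int) + i)).Nodup := by
        refine (PySem.List.nodup_pyRange_one 0 (l.length : Int)).map ?_
        intro a b h; simp only [add_right_inj] at h; exact h
      have hitems := PySem.Dict.items_foldl_insert_fresh
        (l := PySem.List.pyRange 0 (l.length : Int) 1)
        (k := fun i => (L.length : Int) + i) (v := fun _ => li) (d := d) hfresh hnd
      have hd' : ((PySem.List.pyRange 0 (l.length : Int) 1).foldl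
            (fun d i => d.insert ((L.length : Int) + i) li) d).items
          = PySem.List.enumerate (L ++ List.replicate l.length li) 0 := by
        rw [hitems, hd, PySem.List.enumerate_append, enumerate_replicate]
        simp only [zero_add]
        congr 1
        rw [PySem.List.pyRange_one 0 (l.length : Int),
          PySem.List.pyRange_one (L.length : Int) ((L.length : Int) + l.length)]
        have h2 : ((L.length : Int) + l.length - L.length) = ((l.length : Int) - 0) := by ring
        rw [h2]
        simp [List.map_map, Function.comp]
      have hlen : ((L ++ List.replicate l.length li).length : Int)
          = (L.length : Int) + (l.length : Int) := by simp
      have hrec := ih (li + 1) (L ++ List.replicate l.length li) _ hd'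
      rw [hlen] at hrec
      rw [layersOf, ← List.append_assoc]
      exact hrec

-- ---- facts about prefixOf / totalOf / layersOf ----

theorem length_prefixOf (ls : List (List Int)) : (prefixOf ls).length = ls.length := by
  induction ls with
  | nil => rfl
  | cons l r ih => simp [prefixOf, ih]

theorem length_layersOf (ls : List (List Int)) (li : Int) :
    ((layersOf ls li).length : Int) = totalOf ls := by
  induction ls generalizing li with
  | nil => rfl
  | cons l r ih => simp [layersOf, totalOf, ih (li + 1)]

theorem mem_prefixOf_nonneg (ls : List (List Int)) : ∀ x ∈ prefixOf ls, 0 ≤ x := by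
  induction ls with
  | nil => simp [prefixOf]
  | cons l r ih =>
      intro x hx
      rcases List.mem_cons.mp hx with h | h
      · omega
      · obtain ⟨y, hy, rfl⟩ := List.mem_map.mp h
        have := ih y hy; omega

theorem totalOf_nonneg (ls : List (List Int)) : 0 ≤ totalOf ls := by
  induction ls with
  | nil => simp [totalOf]
  | cons l r ih => simp [totalOf]; omega

theorem mem_prefixOf_le_total (ls : List (List Int)) : ∀ x ∈ prefixOf ls, x ≤ totalOf ls := by
  induction ls with
  | nil => simp [prefixOf]
  | cons l r ih =>
      intro x hx
      rcases List.mem_cons.mp hx with h | h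
      · subst h
        have := totalOf_nonneg r
        simp [totalOf]; omega
      · obtain ⟨y, hy, rfl⟩ := List.mem_map.mp h
        have := ih y hy
        simp [totalOf]; omega

theorem pairwise_le_prefixOf (ls : List (List Int)) : (prefixOf ls).Pairwise (· ≤ ·) := by
  induction ls with
  | nil => simp [prefixOf]
  | cons l r ih =>
      refine List.Pairwise.cons ?_ ?_
      · intro x hx
        obtain ⟨y, hy, rfl⟩ := List.mem_map.mp hx
        have := mem_prefixOf_nonneg r y hy; omega
      · exact ih.map _ (fun a b hab => by omega)

theorem getLast?_prefixOf (ls : List (List Int)) (h : ls ≠ []) :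
    (prefixOf ls).getLast? = some (totalOf ls) := by
  induction ls with
  | nil => exact absurd rfl h
  | cons l r ih =>
      cases r with
      | nil => simp [prefixOf, totalOf]
      | cons a b =>
          have hne : (prefixOf (a :: b)).map (· + (l.length : Int)) ≠ [] := by
            simp [prefixOf]
          rw [prefixOf, show ((l.length : Int)
                :: (prefixOf (a :: b)).map (· + (l.length : Int)))
              = [(l.length : Int)] ++ (prefixOf (a :: b)).map (· + (l.length : Int)) from rfl,
            List.getLast?_append_of_ne_nil _ hne, List.getLast?_map, ih (by simp)]
          simp [totalOf]
          ring

theorem bounds_loop (ls : List (List Int)) (acc : List Int) (c : Int) :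
    ls.foldl (fun (st : List Int × Int) id_list =>
      (st.1 ++ [st.2 + id_list.length], st.2 + id_list.length)) (acc, c)
    = (acc ++ (prefixOf ls).map (· + c), c + totalOf ls) := by
  induction ls generalizing acc c with
  | nil => simp [prefixOf, totalOf]
  | cons l r ih =>
      simp only [List.foldl_cons]
      rw [ih]
      refine Prod.ext ?_ ?_
      · show acc ++ [c + (l.length : Int)] ++ (prefixOf r).map (· + (c + l.length))
            = acc ++ (prefixOf (l :: r)).map (· + c)
        rw [prefixOf, List.map_cons, List.map_map, List.append_assoc]
        congr 1
        rw [List.singleton_append]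
        congr 1
        · ring
        · exact List.map_congr_left (fun x _ => by simp [Function.comp]; ring)
      · show c + (l.length : Int) + totalOf r = c + totalOf (l :: r)
        rw [totalOf]; ring

theorem prefixOf_getElem_mono (ls : List (List Int)) (i j : Nat) (hij : i ≤ j)
    (hj : j < (prefixOf ls).length) :
    (prefixOf ls)[i]'(Nat.lt_of_le_of_lt hij hj) ≤ (prefixOf ls)[j] := by
  rcases Nat.lt_or_ge i j with h | h
  · exact List.pairwise_iff_getElem.mp (pairwise_le_prefixOf ls) i j _ hj h
  · have : i = j := by omega
    subst this
    exact le_refl _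

-- binary-search invariant: the result r keeps lo ≤ r ≤ hi, everything below r is ≤ t,
-- and bounds[r] > t
theorem locateGo_spec (bounds : List Int) (t : Int)
    (hmono : ∀ (i j : Nat) (hij : i ≤ j) (hj : j < bounds.length),
      bounds[i]'(Nat.lt_of_le_of_lt hij hj) ≤ bounds[j]) :
    ∀ (n : Nat) (lo hi : Int), (hi - lo).toNat ≤ n →
    0 ≤ lo → lo ≤ hi → hi < (bounds.length : Int) →
    (∀ j : Int, 0 ≤ j → j < lo → PySem.List.pyGetD bounds j 0 ≤ t) →
    t < PySem.List.pyGetD bounds hi 0 →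
    (lo ≤ locateGo bounds t lo hi ∧ locateGo bounds t lo hi < (bounds.length : Int) ∧
     (∀ j : Int, 0 ≤ j → j < locateGo bounds t lo hi → PySem.List.pyGetD bounds j 0 ≤ t) ∧
     t < PySem.List.pyGetD bounds (locateGo bounds t lo hi) 0) := by
  intro n
  induction n with
  | zero =>
      intro lo hi hn h0 hlohi hhi hbelow habove
      have : lo = hi := by omega
      subst this
      rw [locateGo, dif_neg (by omega)]
      exact ⟨le_refl _, by omega, hbelow, habove⟩
  | succ m ih =>
      intro lo hi hn h0 hlohi hhi hbelow habove
      by_cases h : lo < hi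
      · rw [locateGo, dif_pos h]
        have hmid := PySem.Int.floordiv_two_mid_bounds (le_of_lt h)
        have hmidlt : PySem.Int.floordiv (lo + hi) 2 < hi := by
          rw [PySem.Int.floordiv_lt_iff_lt_mul (by norm_num)]
          omega
        by_cases hc : t < PySem.List.pyGetD bounds (PySem.Int.floordiv (lo + hi) 2) 0
        · rw [if_pos hc]
          exact ih lo (PySem.Int.floordiv (lo + hi) 2) (by omega) h0 hmid.1
            (by omega) hbelow hc
        · rw [if_neg hc]
          rw [not_lt] at hc
          have hmidbelow : ∀ j : Int, 0 ≤ j → j < PySem.Int.floordiv (lo + hi) 2 + 1 →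
              PySem.List.pyGetD bounds j 0 ≤ t := by
            intro j hj0 hj
            rcases lt_or_ge j lo with hjlo | hjlo
            · exact hbelow j hj0 hjlo
            · -- lo ≤ j ≤ mid: use monotonicity up to mid, then hc
              have hjlen : j < (bounds.length : Int) := by omega
              have hmidlen : PySem.Int.floordiv (lo + hi) 2 < (bounds.length : Int) := by
                omega
              rw [PySem.List.pyGetD_eq_getElem bounds 0 hj0 (by exact_mod_cast hjlen)]
              rw [PySem.List.pyGetD_eq_getElem bounds 0 (by omega)
                (by exact_mod_cast hmidlen)] at hc
              exact le_trans (hmono j.toNat (PySem.Int.floordiv (lo + hi) 2).toNat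
                (by omega) (by omega)) hc
          obtain ⟨a1, a2, a3, a4⟩ := ih (PySem.Int.floordiv (lo + hi) 2 + 1) hi
            (by omega) (by omega) (by omega) hhi hmidbelow habove
          exact ⟨by omega, a2, a3, a4⟩
      · rw [locateGo, dif_neg h]
        have : lo = hi := by omega
        subst this
        exact ⟨le_refl _, by omega, hbelow, habove⟩

-- shifting layersOf's start by 1 = mapping (+1)
theorem layersOf_succ (ls : List (List Int)) (li : Int) :
    layersOf ls (li + 1) = (layersOf ls li).map (· + 1) := by
  induction ls generalizing li with
  | nil => simp [layersOf]
  | cons l t ih => simp [layersOf, ih (li + 1)]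

-- the flat layer list agrees with the first-prefix-bound-above characterisation
theorem layers_getD (ls : List (List Int)) :
    ∀ (t k : Int) (d : Int), 0 ≤ t → 0 ≤ k → k < (ls.length : Int) →
    (∀ j : Int, 0 ≤ j → j < k → PySem.List.pyGetD (prefixOf ls) j 0 ≤ t) →
    t < PySem.List.pyGetD (prefixOf ls) k 0 →
    PySem.List.pyGetD (layersOf ls 0) t d = k := by
  induction ls with
  | nil => intro t k d _ _ hk _ _; simp at hk; omega
  | cons l r ih =>
      intro t k d ht0 hk0 hk hbelow habove
      rw [show t = ((t.toNat : Nat) : Int) by omega, PySem.List.pyGetD_natCast, layersOf]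
      by_cases hk1 : k = 0
      · subst hk1
        rw [prefixOf, PySem.List.pyGetD_zero_cons] at habove
        -- t < l.length: the answer sits in the replicate block
        rw [List.getD_append _ _ _ _ (by simp; omega),
          List.getD_eq_getElem _ _ (by simp; omega)]
        simp
      · -- k ≥ 1: t lies past the first block; recurse on the shifted tail
        have hlt : (l.length : Int) ≤ t := by
          have := hbelow 0 (le_refl 0) (by omega)
          rwa [prefixOf, PySem.List.pyGetD_zero_cons] at this
        have hrlen : k - 1 < (r.length : Int) := by simp at hk; omega
        have hprefix_shift : ∀ j : Int, 0 ≤ j → j < (r.length : Int) →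
            PySem.List.pyGetD (prefixOf (l :: r)) (j + 1) 0
              = PySem.List.pyGetD (prefixOf r) j 0 + (l.length : Int) := by
          intro j hj0 hj
          have hjlen : j.toNat < (prefixOf r).length := by rw [length_prefixOf]; omega
          rw [PySem.List.pyGetD_eq_getElem (prefixOf (l :: r)) 0 (by omega)
              (by simp [prefixOf, length_prefixOf]; omega),
            PySem.List.pyGetD_eq_getElem (prefixOf r) 0 hj0
              (by simp [length_prefixOf]; omega)]
          have hjt : (j + 1).toNat = j.toNat + 1 := by omega
          simp only [show prefixOf (l :: r)
              = (l.length : Int) :: (prefixOf r).map (· + (l.length : Int)) from rfl,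
            hjt, List.getElem_cons_succ, List.getElem_map]
        have htotr : t - (l.length : Int) < PySem.List.pyGetD (prefixOf r) (k - 1) 0 := by
          have h1 := habove
          rw [show k = (k - 1) + 1 by ring, hprefix_shift (k - 1) (by omega) hrlen] at h1
          omega
        have hbelr : ∀ j : Int, 0 ≤ j → j < k - 1 →
            PySem.List.pyGetD (prefixOf r) j 0 ≤ t - (l.length : Int) := by
          intro j hj0 hj
          have h1 := hbelow (j + 1) (by omega) (by omega)
          rw [hprefix_shift j hj0 (by omega)] at h1
          omega
        have hrec := ih (t - (l.length : Int)) (k - 1) d (by omega) (by omega)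
          hrlen hbelr htotr
        -- t - l.length is strictly below some prefix value, hence in range of layersOf r 0
        have htr : (t.toNat - l.length : Nat) < (layersOf r 0).length := by
          have hmem : PySem.List.pyGetD (prefixOf r) (k - 1) 0 ∈ prefixOf r := by
            refine PySem.List.pyGetD_mem (prefixOf r) 0 ?_
            unfold PySem.Raise.InRange
            rw [length_prefixOf]
            omega
          have h2 := mem_prefixOf_le_total r _ hmem
          have h3 := length_layersOf r 0
          omega
        rw [show t - (l.length : Int) = ((t.toNat - l.length : Nat) : Int) by omega,
          PySem.List.pyGetD_natCast] at hrec
        rw [List.getD_append_right _ _ _ _ (by simp; omega), List.length_replicate,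
          layersOf_succ, List.getD_eq_getElem _ _ (by simpa using htr),
          List.getElem_map, ← List.getD_eq_getElem _ d htr, hrec]
        omega

-- ===== VERDICT =====
theorem get_tag_id_to_layer_id_spec : Claim_equal_get_tag_id_to_layer_id := by
  intro ls _
  show get_tag_id_to_layer_id ls = get_tag_id_to_layer_id_alt ls
  unfold get_tag_id_to_layer_id get_tag_id_to_layer_id_alt
  -- A's side: the dict enumerates the flat layer list
  have hA := A_loop ls 0 [] PySem.Dict.empty (by rfl)
  simp only [List.length_nil, Int.natCast_zero, List.nil_append] at hA
  rw [hA]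
  -- B's side: the bounds loop yields prefixOf/totalOf
  rw [bounds_loop]
  simp only [List.nil_append]
  have hmapid : (prefixOf ls).map (· + (0 : Int)) = prefixOf ls := by
    simpa using List.map_id (prefixOf ls)
  rw [hmapid]
  -- B's dict over fresh distinct keys
  have hitems := PySem.Dict.items_foldl_insert_fresh
    (l := PySem.List.pyRange 0 (0 + totalOf ls) 1)
    (k := fun t => t)
    (v := fun t => locateGo (prefixOf ls) t 0 (((prefixOf ls).length : Int) - 1))
    (d := PySem.Dict.empty)
    (by intro a _; exact PySem.Dict.contains_empty _)
    (by simpa using PySem.List.nodup_pyRange_one 0 (0 + totalOf ls))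
  rw [hitems, show (PySem.Dict.empty : PySem.Dict Int Int).items = [] from rfl,
    List.nil_append]
  -- both sides are maps over the same range
  rw [PySem.List.enumerate_eq_map_pyRange (d := 0)]
  have hlen : ((layersOf ls 0).length : Int) = totalOf ls := length_layersOf ls 0
  rw [PySem.List.len_eq, show ((layersOf ls 0).length : Int) = 0 + totalOf ls by omega]
  refine List.map_congr_left ?_
  intro t ht
  rw [PySem.List.mem_pyRange_one] at ht
  -- ls is nonempty (some tag exists)
  have hne : ls ≠ [] := by
    intro hnil; subst hnil; simp [totalOf] at ht; omega
  have hlenpos : 1 ≤ (prefixOf ls).length := by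
    cases ls with
    | nil => exact absurd rfl hne
    | cons a b => simp [prefixOf]
  -- the top bound is the total
  have hlast : PySem.List.pyGetD (prefixOf ls) (((prefixOf ls).length : Int) - 1) 0
      = totalOf ls := by
    rw [PySem.List.pyGetD_eq_getElem (prefixOf ls) 0 (by omega) (by omega)]
    have h1 := getLast?_prefixOf ls hne
    rw [List.getLast?_eq_getElem?] at h1
    have h2 : (prefixOf ls)[(prefixOf ls).length - 1]'(by omega) = totalOf ls := by
      have := List.getElem?_eq_getElem
        (l := prefixOf ls) (i := (prefixOf ls).length - 1) (by omega)
      rw [this] at h1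
      exact Option.some_injective _ h1
    convert h2 using 2
    omega
  have hmono : ∀ (i j : Nat) (hij : i ≤ j) (hj : j < (prefixOf ls).length),
      (prefixOf ls)[i]'(Nat.lt_of_le_of_lt hij hj) ≤ (prefixOf ls)[j] :=
    fun i j hij hj => prefixOf_getElem_mono ls i j hij hj
  have hspec := locateGo_spec (prefixOf ls) t hmono
    ((((prefixOf ls).length : Int) - 1 - 0).toNat) 0 (((prefixOf ls).length : Int) - 1)
    (le_refl _) (le_refl _) (by omega) (by omega)
    (by intro j hj0 hj; omega)
    (by rw [hlast]; omega)
  obtain ⟨hr0, hrlen, hrbelow, hrabove⟩ := hspec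
  have := layers_getD ls t (locateGo (prefixOf ls) t 0 (((prefixOf ls).length : Int) - 1)) 0
    (by omega) hr0 (by rw [← length_prefixOf]; exact_mod_cast hrlen) hrbelow hrabove
  rw [this]
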